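-- pv_equiv track=rewrite | github.com/davidoxford/euler | poker/poker.py | highestCard
-- ===== SOURCE A (Python) =====
-- def highestCard(hands):
--     # Returns the player number (index of hands) with the highest card from a list of hands
--     # hands is a list of lists of the form:
--     # [ [(14, 'C'), (10, 'S'), (7, 'D'), (5, 'D'), (3, 'S')],
--     #   [(14, 'S'), (10, 'C'), (9, 'H'), (8, 'C'), (3, 'S')] ]
--     # Assumes that there is a clear winner. Ties will return an arbitrary winner.
--
--     # Build list of lists of ranks for each hand
--     # e.g., [[14, 10, 7, 5, 3], [14, 10, 9, 8, 3]]
--     ranks = []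
--     for x in range(len(hands)):
--         ranklist = [card[0] for card in hands[x]]   # e.g., [14, 10, 7, 5, 3]
--         ranks.append(ranklist)
--
--     best_hand = max(hand for hand in ranks)     # Determine which of the lists of ranks is highest
--                                                 # max() will search down the list till it finds the highest one
--     player_with_best_hand = ranks.index(best_hand)
--
--     return player_with_best_hand
-- ===== SOURCE B (Python) =====
-- def highestCard(hands):
--     # Single fused pass: track the best rank list and its index; strict '>'
--     # keeps the earliest hand on ties, like max() followed by .index().
--     if not hands:
--         raise ValueError("highestCard() arg is an empty sequence")
--     best_index = 0
--     best_ranks = [card[0] for card in hands[0]]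
--     for i, hand in enumerate(hands[1:], 1):
--         r = [card[0] for card in hand]
--         if r > best_ranks:
--             best_index, best_ranks = i, r
--     return best_index
-- ===== Notes on version B (the rewrite author's own statement) =====
-- stated objective: simpler
-- what changed: Replaces A's three passes (build a ranks table, max() over it, list.index of the max) by one fused loop over hands that computes each rank list inline and keeps best_index/best_ranks under strict lexicographic '>'.
import Mathlib
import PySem

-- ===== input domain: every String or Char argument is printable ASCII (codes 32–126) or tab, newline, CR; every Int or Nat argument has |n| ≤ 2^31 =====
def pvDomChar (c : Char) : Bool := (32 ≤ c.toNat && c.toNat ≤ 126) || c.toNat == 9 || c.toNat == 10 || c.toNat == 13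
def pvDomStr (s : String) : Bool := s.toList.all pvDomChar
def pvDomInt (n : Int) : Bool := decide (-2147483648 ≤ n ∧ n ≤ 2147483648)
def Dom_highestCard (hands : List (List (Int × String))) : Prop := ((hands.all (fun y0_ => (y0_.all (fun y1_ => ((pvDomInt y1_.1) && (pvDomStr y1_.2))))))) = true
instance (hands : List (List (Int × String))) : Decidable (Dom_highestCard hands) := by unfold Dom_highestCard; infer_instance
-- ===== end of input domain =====

-- B fuses A's three passes (ranks table, max(), .index) into one loop tracking
-- best_index/best_ranks; objective: simpler (same asymptotic cost).

-- ===== PORT A =====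
def highestCard (hands : List (List (Int × String))) : Int :=
  -- ranks = []; for x in range(len(hands)): ranks.append([card[0] for card in hands[x]])
  let ranks := (PySem.List.pyRange 0 (PySem.List.len hands) 1).foldl
      (fun acc x => acc ++ [(PySem.List.pyGetD hands x []).map (fun card => card.1)]) []
  match ranks with
  | [] => 0   -- max() over an empty generator raises ValueError; excluded by Pre_
  | r :: rs =>
    -- best_hand = max(hand for hand in ranks): running max with strict '>' update
    let best := rs.foldl (fun b h => if b < h then h else b) r
    -- player_with_best_hand = ranks.index(best_hand)  (present, so the default is never used)
    ((PySem.List.index? (r :: rs) best).getD 0 : Int)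

-- ===== PORT B =====
def highestCard_alt (hands : List (List (Int × String))) : Int :=
  match hands with
  | [] => 0   -- raise ValueError; excluded by Pre_
  | h :: t =>
    ((PySem.List.enumerate t 1).foldl
      (fun (b : Int × List Int) p =>
        let r := p.2.map (fun card => card.1)
        if b.2 < r then (p.1, r) else b)
      ((0 : Int), h.map (fun card => card.1))).1

-- ===== PRECONDITION & SPEC =====
-- Pre_ excludes only the empty list, on which both Pythons raise ValueError.
def Pre_highestCard (hands : List (List (Int × String))) : Prop := hands ≠ []
instance (hands : List (List (Int × String))) : Decidable (Pre_highestCard hands) := by unfold Pre_highestCard; infer_instance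
def pvWitness_highestCard : (List (List (Int × String))) := [[(14, "C"), (3, "S")], [(14, "S"), (9, "H")]]

def Spec_highestCard (hands : List (List (Int × String))) (out : Int) : Prop := out = highestCard_alt hands
instance (hands : List (List (Int × String))) (out : Int) : Decidable (Spec_highestCard hands out) := by unfold Spec_highestCard; infer_instance

-- ===== CLAIM (what is proved, stated in full; the proofs are below) =====
def Claim_equal_highestCard : Prop := ∀ (hands : List (List (Int × String))), Dom_highestCard hands → Pre_highestCard hands → Spec_highestCard hands (highestCard hands)

-- ===== LEMMAS AND PROOFS =====

-- the for-loop that appends one element per iteration is a map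
theorem pvFoldlPush {α β : Type} (f : α → β) (l : List α) (acc : List β) :
    l.foldl (fun acc x => acc ++ [f x]) acc = acc ++ l.map f := by
  induction l generalizing acc with
  | nil => simp
  | cons x xs ih => simp [List.foldl_cons, ih]

theorem pvEnumerateMap {α β : Type} (f : α → β) (l : List α) (s : Int) :
    PySem.List.enumerate (l.map f) s = (PySem.List.enumerate l s).map (fun p => (p.1, f p.2)) := by
  induction l generalizing s with
  | nil => simp [PySem.List.enumerate_nil]
  | cons x xs ih => simp [PySem.List.enumerate_cons, ih]

-- loop invariant: (i, best) with best the running max of the processed prefix,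
-- i its first index there, and nothing in the prefix above best
theorem pvLoop (rest : List (List Int)) :
    ∀ (pre : List (List Int)) (i : Nat) (best : List Int),
      PySem.List.index? pre best = some i →
      (∀ x ∈ pre, ¬ best < x) →
      (PySem.List.enumerate rest (pre.length : Int)).foldl
          (fun (b : Int × List Int) p => if b.2 < p.2 then (p.1, p.2) else b) ((i : Int), best)
        = (((PySem.List.index? (pre ++ rest)
              (rest.foldl (fun b h => if b < h then h else b) best)).getD 0 : Int),
           rest.foldl (fun b h => if b < h then h else b) best) := by
  induction rest with
  | nil =>
    intro pre i best h1 _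
    simp only [PySem.List.enumerate_nil, List.foldl_nil, List.append_nil, h1, Option.getD_some]
  | cons h t ih =>
    intro pre i best h1 h2
    have hmem : best ∈ pre := by
      have hs := PySem.List.index?_isSome_iff pre best
      rw [h1] at hs; simpa using hs
    rw [PySem.List.enumerate_cons, List.foldl_cons, List.foldl_cons]
    by_cases hlt : best < h
    · have hnot : h ∉ pre := fun hm => (h2 h hm) hlt
      have key := ih (pre ++ [h]) pre.length h
        (PySem.List.index?_append_singleton_self pre h hnot)
        (by
          intro x hx
          rcases List.mem_append.mp hx with hx | hx
          · exact fun hlx => (h2 x hx) (lt_trans hlt hlx)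
          · simp at hx; subst hx; exact lt_irrefl _)
      simp only [List.length_append, List.length_cons, List.length_nil] at key
      push_cast at key
      simp only [List.append_assoc, List.singleton_append] at key
      simpa [hlt] using key
    · have key := ih (pre ++ [h]) i best
        (by rw [PySem.List.index?_append_of_mem _ hmem]; exact h1)
        (by
          intro x hx
          rcases List.mem_append.mp hx with hx | hx
          · exact h2 x hx
          · simp at hx; subst hx; exact hlt)
      simp only [List.length_append, List.length_cons, List.length_nil] at key
      push_cast at key
      simp only [List.append_assoc, List.singleton_append] at key
      simpa [hlt] using key

-- ===== VERDICT (by name: the statement is the Claim_ definition above) =====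
theorem highestCard_spec : Claim_equal_highestCard := by
  intro hands _ hpre
  unfold Spec_highestCard highestCard highestCard_alt
  match hands with
  | [] => exact absurd rfl hpre
  | h :: t =>
    simp only [PySem.List.len_eq]
    rw [PySem.List.foldl_pyRange_zero_pyGetD' (h :: t) [] (fun acc hd => acc ++ [hd.map (fun card => card.1)]) []]
    rw [pvFoldlPush (fun hd => hd.map (fun card => card.1)) (h :: t) []]
    simp only [List.nil_append, List.map_cons]
    have hB :
        ((PySem.List.enumerate t 1).foldl
          (fun (b : Int × List Int) p =>
            let r := p.2.map (fun card => card.1)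
            if b.2 < r then (p.1, r) else b)
          ((0 : Int), h.map (fun card => card.1)))
        = (PySem.List.enumerate (t.map (fun hd => hd.map (fun card => card.1))) 1).foldl
            (fun (b : Int × List Int) p => if b.2 < p.2 then (p.1, p.2) else b)
            ((0 : Int), h.map (fun card => card.1)) := by
      rw [pvEnumerateMap, List.foldl_map]
    rw [hB]
    have key := pvLoop (t.map (fun hd => hd.map (fun card => card.1)))
      [h.map (fun card => card.1)] 0 (h.map (fun card => card.1))
      (PySem.List.index?_cons_self _ _)
      (by intro x hx; simp at hx; subst hx; exact lt_irrefl _)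
    norm_num [List.singleton_append] at key
    rw [key]
    simp [PySem.List.index?_eq_idxOf?]
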